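-- pv_equiv track=rewrite | github.com/jmegner/CheckioPuzzles | cipher-crossword.py | crosswordHasConflict
-- ===== SOURCE A (Python) =====
-- def crosswordHasConflict(
--     horizClues,
--     vertClues,
--     horizWords,
--     vertWords,
-- ):
--     lineClues = horizClues[:len(horizWords)] + vertClues[:len(vertWords)]
--     clueValToLetter = {}
--     letterToClueVal = {}
--
--     for word, lineClue in zip(horizWords + vertWords, lineClues):
--         for letter, clueVal in zip(word, lineClue):
--             if clueValToLetter.setdefault(clueVal, letter) != letter:
--                 return True
--             if letterToClueVal.setdefault(letter, clueVal) != clueVal: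
--                 return True
--
--     return False
-- ===== SOURCE B (Python) =====
-- def crosswordHasConflict(
--     horizClues,
--     vertClues,
--     horizWords,
--     vertWords,
-- ):
--     lineClues = horizClues[:len(horizWords)] + vertClues[:len(vertWords)]
--     pairs = [(letter, clueVal)
--              for word, lineClue in zip(horizWords + vertWords, lineClues)
--              for letter, clueVal in zip(word, lineClue)]
--     return any((p[0] == q[0]) != (p[1] == q[1]) for p in pairs for q in pairs)
-- ===== Notes on version B (the rewrite author's own statement) =====
-- stated objective: alternative
-- what changed: Drops both dictionaries entirely: B flattens all (letter, clueVal) assignments into one list and declares a conflict iff some two assignments agree on the letter but not the value or vice versa, a brute-force pairwise consistency check instead of A's incremental first-seen dict comparison with early return.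
import Mathlib
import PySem

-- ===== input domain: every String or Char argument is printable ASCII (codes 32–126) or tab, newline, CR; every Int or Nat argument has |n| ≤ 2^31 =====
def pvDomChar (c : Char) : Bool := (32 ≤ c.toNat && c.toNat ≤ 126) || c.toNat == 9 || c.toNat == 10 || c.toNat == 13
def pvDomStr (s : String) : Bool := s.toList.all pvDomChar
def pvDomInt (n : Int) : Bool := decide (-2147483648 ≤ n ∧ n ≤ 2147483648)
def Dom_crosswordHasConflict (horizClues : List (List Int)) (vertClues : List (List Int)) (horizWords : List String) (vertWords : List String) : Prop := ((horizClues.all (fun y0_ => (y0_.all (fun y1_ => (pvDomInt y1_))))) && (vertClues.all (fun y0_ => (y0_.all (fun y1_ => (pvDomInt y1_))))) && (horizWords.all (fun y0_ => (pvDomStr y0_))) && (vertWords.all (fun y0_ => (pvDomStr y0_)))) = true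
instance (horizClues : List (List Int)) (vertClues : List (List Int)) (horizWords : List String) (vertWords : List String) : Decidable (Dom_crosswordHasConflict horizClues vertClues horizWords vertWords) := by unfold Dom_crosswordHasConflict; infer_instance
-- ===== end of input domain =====

-- B drops A's two dictionaries entirely: it flattens all (letter, clueVal) assignments into one
-- list and reports a conflict iff some two assignments agree on exactly one component — a
-- brute-force pairwise consistency check (alternative decomposition, quadratic, not faster).

-- ===== PORT A =====
-- inner 'for letter, clueVal in zip(word, lineClue)': none = early 'return True'
def pvAInner (cvl : PySem.Dict Int Char) (ltv : PySem.Dict Char Int) :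
    List (Char × Int) → Option (PySem.Dict Int Char × PySem.Dict Char Int)
  | [] => some (cvl, ltv)
  | (letter, clueVal) :: rest =>
      -- 'clueValToLetter.setdefault(clueVal, letter) != letter'
      if ((cvl.get? clueVal).getD letter) ≠ letter then none
      else
        -- 'letterToClueVal.setdefault(letter, clueVal) != clueVal'
        if ((ltv.get? letter).getD clueVal) ≠ clueVal then none
        else pvAInner (cvl.setdefault clueVal letter) (ltv.setdefault letter clueVal) rest

-- outer 'for word, lineClue in zip(...)'
def pvALoop : List (String × List Int) → PySem.Dict Int Char → PySem.Dict Char Int → Bool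
  | [], _, _ => false
  | (word, lineClue) :: rest, cvl, ltv =>
      match pvAInner cvl ltv (word.toList.zip lineClue) with
      | none => true
      | some (cvl', ltv') => pvALoop rest cvl' ltv'

def crosswordHasConflict (horizClues : List (List Int)) (vertClues : List (List Int)) (horizWords : List String) (vertWords : List String) : Bool :=
  let lineClues := PySem.List.slice horizClues none (some (horizWords.length : Int)) ++
                   PySem.List.slice vertClues none (some (vertWords.length : Int))
  pvALoop ((horizWords ++ vertWords).zip lineClues) PySem.Dict.empty PySem.Dict.empty

-- ===== PORT B =====
def crosswordHasConflict_alt (horizClues : List (List Int)) (vertClues : List (List Int)) (horizWords : List String) (vertWords : List String) : Bool :=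
  let lineClues := PySem.List.slice horizClues none (some (horizWords.length : Int)) ++
                   PySem.List.slice vertClues none (some (vertWords.length : Int))
  -- the nested list comprehension building 'pairs'
  let pairs := ((horizWords ++ vertWords).zip lineClues).flatMap
      (fun wl => wl.1.toList.zip wl.2)
  -- 'any((p[0] == q[0]) != (p[1] == q[1]) for p in pairs for q in pairs)'
  pairs.any (fun p => pairs.any (fun q => (p.1 == q.1) != (p.2 == q.2)))

-- ===== PRECONDITION & SPEC =====
def Spec_crosswordHasConflict (horizClues : List (List Int)) (vertClues : List (List Int)) (horizWords : List String) (vertWords : List String) (out : Bool) : Prop := out = crosswordHasConflict_alt horizClues vertClues horizWords vertWords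
instance (horizClues : List (List Int)) (vertClues : List (List Int)) (horizWords : List String) (vertWords : List String) (out : Bool) : Decidable (Spec_crosswordHasConflict horizClues vertClues horizWords vertWords out) := by unfold Spec_crosswordHasConflict; infer_instance

-- ===== CLAIM (what is proved, stated in full; the proofs are below) =====
def Claim_equal_crosswordHasConflict : Prop := ∀ (horizClues : List (List Int)) (vertClues : List (List Int)) (horizWords : List String) (vertWords : List String), Dom_crosswordHasConflict horizClues vertClues horizWords vertWords → Spec_crosswordHasConflict horizClues vertClues horizWords vertWords (crosswordHasConflict horizClues vertClues horizWords vertWords)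

-- ===== LEMMAS AND PROOFS =====

-- B's pairwise conflict test over a flat pair list
def pvConf (L : List (Char × Int)) : Bool :=
  L.any (fun p => L.any (fun q => (p.1 == q.1) != (p.2 == q.2)))

-- 'no conflict': any two assignments agree on the letter iff they agree on the value
def pvNC (S : List (Char × Int)) : Prop :=
  ∀ p ∈ S, ∀ q ∈ S, (p.1 = q.1 ↔ p.2 = q.2)

theorem pvConf_false_iff (L : List (Char × Int)) : pvConf L = false ↔ pvNC L := by
  constructor
  · intro h p hp q hq
    have hb : ((p.1 == q.1) : Bool) = (p.2 == q.2) := by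
      rw [← bne_eq_false_iff_eq]
      by_contra hne
      rw [Bool.not_eq_false] at hne
      have : pvConf L = true := by
        unfold pvConf
        rw [List.any_eq_true]
        exact ⟨p, hp, by rw [List.any_eq_true]; exact ⟨q, hq, hne⟩⟩
      rw [h] at this
      exact Bool.false_ne_true this
    constructor
    · intro he
      have : (p.2 == q.2) = true := by rw [← hb]; exact beq_iff_eq.mpr he
      exact beq_iff_eq.mp this
    · intro he
      have : (p.1 == q.1) = true := by rw [hb]; exact beq_iff_eq.mpr he
      exact beq_iff_eq.mp this
  · intro h
    unfold pvConf
    rw [List.any_eq_false]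
    intro p hp
    rw [Bool.not_eq_true, List.any_eq_false]
    intro q hq
    have := h p hp q hq
    by_cases h1 : p.1 = q.1
    · simp [h1, this.mp h1]
    · have h2 : ¬ p.2 = q.2 := fun he => h1 (this.mpr he)
      simp [h1, h2]

theorem pvConf_true_of (L : List (Char × Int)) (p q : Char × Int)
    (hp : p ∈ L) (hq : q ∈ L) (h : ¬ (p.1 = q.1 ↔ p.2 = q.2)) : pvConf L = true := by
  unfold pvConf
  simp only [List.any_eq_true]
  refine ⟨p, hp, q, hq, ?_⟩
  by_cases h1 : p.1 = q.1
  · have h2 : ¬ p.2 = q.2 := fun he => h (iff_of_true h1 he)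
    simp [h1, h2]
  · have h2 : p.2 = q.2 := by
      by_contra h2
      exact h (iff_of_false h1 h2)
    simp [h1, h2]

-- find? is some whenever a member satisfies the predicate
theorem pvFind_of_mem {α : Type} (L : List α) (f : α → Bool) (x : α) (hx : x ∈ L)
    (hfx : f x = true) : ∃ y, L.find? f = some y := by
  cases h : L.find? f with
  | none => exact absurd hfx (by simpa using List.find?_eq_none.mp h x hx)
  | some y => exact ⟨y, rfl⟩

-- the core simulation: A's early-exit dict scan over 'rest', having already consumed the
-- conflict-free prefix S that the two dicts summarise, equals B's pairwise test on S ++ rest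
theorem pvKey (rest : List (Char × Int)) (S : List (Char × Int))
    (cvl : PySem.Dict Int Char) (ltv : PySem.Dict Char Int)
    (hc : ∀ v, cvl.get? v = (S.find? (fun q => q.2 == v)).map Prod.fst)
    (hl : ∀ l, ltv.get? l = (S.find? (fun q => q.1 == l)).map Prod.snd)
    (hS : pvNC S) :
    (pvAInner cvl ltv rest).isNone = pvConf (S ++ rest) := by
  induction rest generalizing S cvl ltv with
  | nil =>
      simp only [pvAInner, Option.isNone_some, List.append_nil]
      exact ((pvConf_false_iff S).mpr hS).symm
  | cons hd rest ih =>
      obtain ⟨l, v⟩ := hd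
      simp only [pvAInner]
      by_cases hc1 : ((cvl.get? v).getD l) ≠ l
      · -- clueValToLetter conflict: some earlier assignment gave value v a different letter
        obtain ⟨a, ha, hne⟩ : ∃ a, cvl.get? v = some a ∧ a ≠ l := by
          cases h : cvl.get? v with
          | none => rw [h] at hc1; simp at hc1
          | some a => rw [h] at hc1; simp at hc1; exact ⟨a, rfl, hc1⟩
        rw [hc v] at ha
        obtain ⟨q0, hq0, rfl⟩ : ∃ q0, S.find? (fun q => q.2 == v) = some q0 ∧ q0.1 = a := by
          cases h : S.find? (fun q => q.2 == v) with
          | none => rw [h] at ha; simp at ha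
          | some q0 => rw [h] at ha; simp at ha; exact ⟨q0, rfl, ha⟩
        have hq0v : q0.2 = v := by simpa using List.find?_some hq0
        have hq0mem : q0 ∈ S := List.mem_of_find?_eq_some hq0
        simp only [if_pos hc1, Option.isNone_none]
        exact (pvConf_true_of (S ++ (l, v) :: rest) q0 (l, v)
          (List.mem_append_left _ hq0mem)
          (List.mem_append_right _ (List.mem_cons_self))
          (fun hiff => hne (hiff.mpr hq0v))).symm
      · simp only [if_neg hc1]
        simp only [ne_eq, not_not] at hc1
        by_cases hc2 : ((ltv.get? l).getD v) ≠ v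
        · -- letterToClueVal conflict: letter l already carries a different value
          obtain ⟨a, ha, hne⟩ : ∃ a, ltv.get? l = some a ∧ a ≠ v := by
            cases h : ltv.get? l with
            | none => rw [h] at hc2; simp at hc2
            | some a => rw [h] at hc2; simp at hc2; exact ⟨a, rfl, hc2⟩
          rw [hl l] at ha
          obtain ⟨q0, hq0, rfl⟩ : ∃ q0, S.find? (fun q => q.1 == l) = some q0 ∧ q0.2 = a := by
            cases h : S.find? (fun q => q.1 == l) with
            | none => rw [h] at ha; simp at ha
            | some q0 => rw [h] at ha; simp at ha; exact ⟨q0, rfl, ha⟩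
          have hq0l : q0.1 = l := by simpa using List.find?_some hq0
          have hq0mem : q0 ∈ S := List.mem_of_find?_eq_some hq0
          simp only [if_pos hc2, Option.isNone_none]
          exact (pvConf_true_of (S ++ (l, v) :: rest) q0 (l, v)
            (List.mem_append_left _ hq0mem)
            (List.mem_append_right _ (List.mem_cons_self))
            (fun hiff => hne (hiff.mp hq0l))).symm
        · -- no conflict at (l, v): extend the prefix to S ++ [(l, v)]
          simp only [if_neg hc2]
          simp only [ne_eq, not_not] at hc2
          -- membership in S with value v forces letter l, and dually
          have hval : ∀ p ∈ S, p.2 = v → p.1 = l := by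
            intro p hp hpv
            obtain ⟨q0, hq0⟩ := pvFind_of_mem S (fun q => q.2 == v) p hp (by simpa using hpv)
            have hq0v : q0.2 = v := by simpa using List.find?_some hq0
            have hq0mem : q0 ∈ S := List.mem_of_find?_eq_some hq0
            have hq0l : q0.1 = l := by
              have := hc v
              rw [hq0] at this
              simp at this
              rw [this] at hc1
              simpa using hc1
            have := (hS p hp q0 hq0mem).mpr (hpv.trans hq0v.symm)
            rw [this, hq0l]
          have hlet : ∀ p ∈ S, p.1 = l → p.2 = v := by
            intro p hp hpl
            obtain ⟨q0, hq0⟩ := pvFind_of_mem S (fun q => q.1 == l) p hp (by simpa using hpl)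
            have hq0l : q0.1 = l := by simpa using List.find?_some hq0
            have hq0mem : q0 ∈ S := List.mem_of_find?_eq_some hq0
            have hq0v : q0.2 = v := by
              have := hl l
              rw [hq0] at this
              simp at this
              rw [this] at hc2
              simpa using hc2
            have := (hS p hp q0 hq0mem).mp (hpl.trans hq0l.symm)
            rw [this, hq0v]
          have hS' : pvNC (S ++ [(l, v)]) := by
            intro p hp q hq
            rcases List.mem_append.mp hp with hp | hp <;>
            rcases List.mem_append.mp hq with hq | hq
            · exact hS p hp q hq
            · have hq' : q = (l, v) := by simpa using hq
              subst hq'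
              exact ⟨fun h => hlet p hp h, fun h => hval p hp h⟩
            · have hp' : p = (l, v) := by simpa using hp
              subst hp'
              exact ⟨fun h => (hlet q hq h.symm).symm, fun h => (hval q hq h.symm).symm⟩
            · have hp' : p = (l, v) := by simpa using hp
              have hq' : q = (l, v) := by simpa using hq
              subst hp'; subst hq'
              simp
          have hc' : ∀ v', (cvl.setdefault v l).get? v' =
              ((S ++ [(l, v)]).find? (fun q => q.2 == v')).map Prod.fst := by
            intro v'
            by_cases hv : v' = v
            · subst hv
              rw [PySem.Dict.get?_setdefault_self, hc1]
              rw [List.find?_append]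
              cases h : S.find? (fun q => q.2 == v') with
              | none =>
                  have : cvl.get? v' = none := by rw [hc v', h]; rfl
                  rw [this] at hc1
                  simp
              | some q0 =>
                  have : cvl.get? v' = some q0.1 := by rw [hc v', h]; rfl
                  rw [this] at hc1
                  simp only [Option.getD_some] at hc1
                  simp [hc1]
            · rw [PySem.Dict.get?_setdefault_of_ne _ _ hv, hc v', List.find?_append]
              have hb : (v == v') = false := beq_eq_false_iff_ne.mpr (fun h => hv h.symm)
              have : ([(l, v)].find? (fun q => q.2 == v')) = none := by
                simp [List.find?, hb]
              rw [this]
              cases S.find? (fun q => q.2 == v') <;> simp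
          have hl' : ∀ l', (ltv.setdefault l v).get? l' =
              ((S ++ [(l, v)]).find? (fun q => q.1 == l')).map Prod.snd := by
            intro l'
            by_cases hv : l' = l
            · subst hv
              rw [PySem.Dict.get?_setdefault_self, hc2]
              rw [List.find?_append]
              cases h : S.find? (fun q => q.1 == l') with
              | none =>
                  have : ltv.get? l' = none := by rw [hl l', h]; rfl
                  rw [this] at hc2
                  simp
              | some q0 =>
                  have : ltv.get? l' = some q0.2 := by rw [hl l', h]; rfl
                  rw [this] at hc2
                  simp only [Option.getD_some] at hc2
                  simp [hc2]
            · rw [PySem.Dict.get?_setdefault_of_ne _ _ hv, hl l', List.find?_append]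
              have hb : (l == l') = false := beq_eq_false_iff_ne.mpr (fun h => hv h.symm)
              have : ([(l, v)].find? (fun q => q.1 == l')) = none := by
                simp [List.find?, hb]
              rw [this]
              cases S.find? (fun q => q.1 == l') <;> simp
          have := ih (S ++ [(l, v)]) _ _ hc' hl' hS'
          rw [this]
          congr 1
          simp
  
-- A's concatenation of inner scans
theorem pvAInner_append (xs ys : List (Char × Int)) (cvl : PySem.Dict Int Char) (ltv : PySem.Dict Char Int) :
    pvAInner cvl ltv (xs ++ ys) = (pvAInner cvl ltv xs).bind (fun p => pvAInner p.1 p.2 ys) := by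
  induction xs generalizing cvl ltv with
  | nil => simp [pvAInner]
  | cons p rest ih =>
      obtain ⟨letter, clueVal⟩ := p
      simp only [List.cons_append, pvAInner]
      split
      · simp
      · split
        · simp
        · exact ih _ _

theorem pvALoop_flat (lst : List (String × List Int)) (cvl : PySem.Dict Int Char) (ltv : PySem.Dict Char Int) :
    pvALoop lst cvl ltv = (pvAInner cvl ltv (lst.flatMap (fun p => p.1.toList.zip p.2))).isNone := by
  induction lst generalizing cvl ltv with
  | nil => simp [pvALoop, pvAInner]
  | cons p rest ih =>
      obtain ⟨word, lineClue⟩ := p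
      simp only [pvALoop, List.flatMap_cons, pvAInner_append]
      cases h : pvAInner cvl ltv (word.toList.zip lineClue) with
      | none => simp
      | some q => simp only [Option.bind_some]; exact ih _ _

-- ===== VERDICT (by name: the statement is the Claim_ definition above) =====
theorem crosswordHasConflict_spec : Claim_equal_crosswordHasConflict := by
  intro horizClues vertClues horizWords vertWords _
  unfold Spec_crosswordHasConflict crosswordHasConflict crosswordHasConflict_alt
  simp only []
  rw [pvALoop_flat]
  have := pvKey
    (((horizWords ++ vertWords).zip
      (PySem.List.slice horizClues none (some (horizWords.length : Int)) ++
       PySem.List.slice vertClues none (some (vertWords.length : Int)))).flatMap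
      (fun p => p.1.toList.zip p.2)) [] PySem.Dict.empty PySem.Dict.empty
    (fun v => by simp [PySem.Dict.get?_empty, List.find?])
    (fun l => by simp [PySem.Dict.get?_empty, List.find?])
    (by intro p hp; simp at hp)
  simpa [pvConf] using this
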